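-- pv_equiv track=rewrite | github.com/jhee514/Algorithms | 04_cleanslate/codility_water.py | sol
-- ===== SOURCE A (Python) =====
-- def sol(n, k):
--     flag = 0
--     least = n
--     water = k
--     glasses = list(range(n, 0, -1))
--     cnt = 0
--
--     for i in range(n):
--         if not water:
--             break
--         if water >= glasses[i]:
--             flag = 1
--             water -= glasses[i]
--             cnt += 1
--
--     if water:
--         return -1
--     if flag:
--         return cnt
--     else:
--         return -1
-- ===== SOURCE B (Python) =====
-- def sol(n, k):
--     # Pouring glasses of sizes n, n-1, ..., 1: the greedy descending pass takes the
--     # m largest glasses (with the last one shrunk to the exact remainder), so the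
--     # answer is the least m with m*n - m*(m-1)//2 >= k, found by binary search.
--     if n <= 0 or k <= 0 or k > n * (n + 1) // 2:
--         return -1
--     lo, hi = 1, n
--     while lo < hi:
--         mid = (lo + hi) // 2
--         if mid * n - mid * (mid - 1) // 2 >= k:
--             hi = mid
--         else:
--             lo = mid + 1
--     return lo
-- ===== Notes on version B (the rewrite author's own statement) =====
-- stated objective: faster
-- what changed: Replaces the O(n) greedy descending subtraction loop (which materialises list(range(n,0,-1))) by a closed-form feasibility test against the triangular number n(n+1)/2 plus a binary search for the least m with m*n - m*(m-1)/2 >= k.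
import Mathlib
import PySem

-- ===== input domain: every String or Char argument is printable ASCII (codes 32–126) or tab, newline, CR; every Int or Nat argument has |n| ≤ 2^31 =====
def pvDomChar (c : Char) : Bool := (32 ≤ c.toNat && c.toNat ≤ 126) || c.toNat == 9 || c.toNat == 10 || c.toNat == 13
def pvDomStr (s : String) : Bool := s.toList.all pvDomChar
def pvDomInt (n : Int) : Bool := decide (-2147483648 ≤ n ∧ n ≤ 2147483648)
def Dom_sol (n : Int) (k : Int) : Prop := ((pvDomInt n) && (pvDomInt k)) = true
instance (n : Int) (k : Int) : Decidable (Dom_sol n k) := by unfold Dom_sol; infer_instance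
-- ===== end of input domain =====

-- B replaces A's O(n) greedy subtraction loop by a triangular-number feasibility
-- test plus a binary search for the count (O(log n)); return values agree on all inputs.

-- ===== PORT A =====
-- A's loop 'for i in range(n): … glasses[i] …' with glasses = list(range(n, 0, -1));
-- since len(glasses) = n (and both are empty for n ≤ 0), iterating indices 0..n-1
-- over glasses[i] is exactly iterating the list; the 'break' is the early return.
def solLoopA (gs : List Int) (flag water cnt : Int) : Int × Int × Int :=
  match gs with
  | [] => (flag, water, cnt)
  | g :: rest =>
    if water = 0 then (flag, water, cnt)          -- 'if not water: break'
    else if water ≥ g then solLoopA rest 1 (water - g) (cnt + 1)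
    else solLoopA rest flag water cnt

def sol (n : Int) (k : Int) : Int :=
  let glasses := PySem.List.pyRange n 0 (-1)
  let r := solLoopA glasses 0 k 0
  if r.2.1 ≠ 0 then -1                            -- 'if water: return -1'
  else if r.1 ≠ 0 then r.2.2 else -1              -- 'if flag: return cnt else: return -1'

-- ===== PORT B =====
def bsearchB (n k lo hi : Int) : Int :=
  if h : lo < hi then
    let mid := PySem.Int.floordiv (lo + hi) 2
    if mid * n - PySem.Int.floordiv (mid * (mid - 1)) 2 ≥ k then
      bsearchB n k lo mid
    else
      bsearchB n k (mid + 1) hi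
  else lo
termination_by (hi - lo).toNat
decreasing_by
  all_goals
    have hb := PySem.Int.floordiv_two_mid_bounds (le_of_lt h)
    have he : PySem.Int.floordiv (lo + hi) 2 = (lo + hi) / 2 :=
      PySem.Int.floordiv_eq_ediv_of_pos (by norm_num)
    omega

def sol_alt (n : Int) (k : Int) : Int :=
  if n ≤ 0 ∨ k ≤ 0 ∨ k > PySem.Int.floordiv (n * (n + 1)) 2 then -1
  else bsearchB n k 1 n

-- ===== PRECONDITION & SPEC =====
def Spec_sol (n : Int) (k : Int) (out : Int) : Prop := out = sol_alt n k
instance (n : Int) (k : Int) (out : Int) : Decidable (Spec_sol n k out) := by unfold Spec_sol; infer_instance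

-- ===== CLAIM (what is proved, stated in full; the proofs are below) =====
def Claim_equal_sol : Prop := ∀ (n : Int) (k : Int), Dom_sol n k → Spec_sol n k (sol n k)

-- ===== LEMMAS AND PROOFS =====

-- 'Good n k m': m glasses is exactly the greedy count — the least 1 ≤ m ≤ n with
-- top-m sum m*n - m(m-1)/2 ≥ k (stated multiplied by 2 to avoid division).
def Good (n k m : Int) : Prop :=
  1 ≤ m ∧ m ≤ n ∧ 2 * (m * n) - m * (m - 1) ≥ 2 * k ∧ 2 * ((m - 1) * n) - (m - 1) * (m - 2) < 2 * k

theorem Good_unique {n k a b : Int} (ha : Good n k a) (hb : Good n k b) : a = b := by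
  obtain ⟨ha1, ha2, ha3, ha4⟩ := ha
  obtain ⟨hb1, hb2, hb3, hb4⟩ := hb
  rcases lt_trichotomy a b with h | h | h
  · exfalso
    nlinarith [mul_nonneg (show (0:Int) ≤ b - 1 - a by omega) (show (0:Int) ≤ 2*n - (b-1) - a + 1 by omega)]
  · exact h
  · exfalso
    nlinarith [mul_nonneg (show (0:Int) ≤ a - 1 - b by omega) (show (0:Int) ≤ 2*n - (a-1) - b + 1 by omega)]

theorem solLoopA_zero (l : List Int) (flag cnt : Int) :
    solLoopA l flag 0 cnt = (flag, 0, cnt) := by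
  cases l with
  | nil => rfl
  | cons g rest => simp [solLoopA]

theorem solLoopA_neg (l : List Int) (flag w cnt : Int) (hw : w < 0)
    (hl : ∀ g ∈ l, 1 ≤ g) : solLoopA l flag w cnt = (flag, w, cnt) := by
  induction l with
  | nil => rfl
  | cons g rest ih =>
    have hg : 1 ≤ g := hl g (by simp)
    simp only [solLoopA]
    rw [if_neg (by omega), if_neg (by omega)]
    exact ih (fun x hx => hl x (by simp [hx]))

theorem loopA_main (G : ℕ) : ∀ (w cnt flag : Int), 1 ≤ w → 2 * w ≤ (G:Int) * ((G:Int) + 1) →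
    ∃ m, Good (G:Int) w m ∧
      solLoopA (PySem.List.pyRange (G:Int) 0 (-1)) flag w cnt = (1, 0, cnt + m) := by
  induction G with
  | zero => intro w cnt flag hw hbound; exfalso; simp at hbound; omega
  | succ G ih =>
    intro w cnt flag hw hbound
    set g : Int := ((G+1:ℕ) : Int) with hg
    have hg1 : g = (G:Int) + 1 := by push_cast [hg]; ring
    have hgpos : 0 < g := by omega
    rw [PySem.List.pyRange_neg_one_cons hgpos]
    simp only [solLoopA]
    rw [if_neg (by omega)]
    by_cases hge : w ≥ g
    · rw [if_pos hge]
      by_cases heq : w = g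
      · refine ⟨1, ?_, ?_⟩
        · refine ⟨le_refl 1, by omega, by nlinarith, by nlinarith⟩
        · have : w - g = 0 := by omega
          rw [this, solLoopA_zero]
      · -- w > g, so G ≥ 1 and we recurse
        have hwgt : g < w := lt_of_le_of_ne hge (fun h => heq h.symm)
        have hG1 : 1 ≤ (G:Int) := by nlinarith
        have h1 : 1 ≤ w - g := by omega
        have h2 : 2 * (w - g) ≤ (G:Int) * ((G:Int) + 1) := by nlinarith
        have hcast : g - 1 = (G:Int) := by omega
        obtain ⟨m', hgood, heq'⟩ := ih (w - g) (cnt + 1) 1 h1 h2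
        rw [hcast, heq']
        refine ⟨m' + 1, ?_, by ring_nf⟩
        obtain ⟨hm1, hm2, hm3, hm4⟩ := hgood
        refine ⟨by omega, by omega, by nlinarith, by nlinarith⟩
    · rw [if_neg hge]
      have hwlt : w < g := lt_of_not_ge hge
      have hG1 : 1 ≤ (G:Int) := by omega
      have h2 : 2 * w ≤ (G:Int) * ((G:Int) + 1) := by nlinarith
      have hcast : g - 1 = (G:Int) := by omega
      obtain ⟨m', hgood, heq'⟩ := ih w cnt flag hw h2
      rw [hcast, heq']
      obtain ⟨hm1, hm2, hm3, hm4⟩ := hgood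
      have hm'1 : m' = 1 := by
        by_contra hne
        have hm2' : 2 ≤ m' := by omega
        nlinarith [mul_nonneg (show (0:Int) ≤ m' - 2 by omega)
          (show (0:Int) ≤ 2 * (G:Int) - (m' - 1) by omega)]
      subst hm'1
      exact ⟨1, ⟨le_refl 1, by omega, by nlinarith, by nlinarith⟩, rfl⟩

theorem loopA_over (G : ℕ) : ∀ (w cnt flag : Int), 1 ≤ w → (G:Int) * ((G:Int) + 1) < 2 * w →
    ∃ f c w', solLoopA (PySem.List.pyRange (G:Int) 0 (-1)) flag w cnt = (f, w', c) ∧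
      2 * w' = 2 * w - (G:Int) * ((G:Int) + 1) := by
  induction G with
  | zero =>
    intro w cnt flag hw hbound
    rw [PySem.List.pyRange_neg_one_eq_nil (by omega)]
    exact ⟨flag, cnt, w, rfl, by push_cast; ring⟩
  | succ G ih =>
    intro w cnt flag hw hbound
    set g : Int := ((G+1:ℕ) : Int) with hg
    have hg1 : g = (G:Int) + 1 := by push_cast [hg]; ring
    have hgpos : 0 < g := by omega
    have hwgt : g < w := by nlinarith
    rw [PySem.List.pyRange_neg_one_cons hgpos]
    simp only [solLoopA]
    rw [if_neg (by omega), if_pos (by omega)]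
    have h1 : 1 ≤ w - g := by omega
    have h2 : (G:Int) * ((G:Int) + 1) < 2 * (w - g) := by nlinarith
    have hcast : g - 1 = (G:Int) := by omega
    obtain ⟨f, c, w', heq', hw'⟩ := ih (w - g) (cnt + 1) 1 h1 h2
    rw [hcast, heq']
    exact ⟨f, c, w', rfl, by rw [hw']; nlinarith⟩

theorem mid_even (m : Int) : m * (m - 1) % 2 = 0 := by
  have h := Int.even_mul_succ_self (m - 1)
  have : (m - 1) * (m - 1 + 1) = m * (m - 1) := by ring
  rw [this] at h
  exact Int.even_iff.mp h

theorem bsearchB_good (n k : Int) (D : ℕ) : ∀ (lo hi : Int), (hi - lo).toNat = D →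
    1 ≤ lo → lo ≤ hi → hi ≤ n →
    2 * (hi * n) - hi * (hi - 1) ≥ 2 * k →
    2 * ((lo - 1) * n) - (lo - 1) * (lo - 2) < 2 * k →
    Good n k (bsearchB n k lo hi) := by
  induction D using Nat.strong_induction_on with
  | _ D ihD =>
    intro lo hi hD hlo1 hlohi hhin hhi hloinv
    by_cases h : lo < hi
    · have hb := PySem.Int.floordiv_two_mid_bounds (le_of_lt h)
      have he : PySem.Int.floordiv (lo + hi) 2 = (lo + hi) / 2 :=
        PySem.Int.floordiv_eq_ediv_of_pos (by norm_num)
      set mid : Int := PySem.Int.floordiv (lo + hi) 2 with hmid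
      have hmlt : mid < hi := by omega
      have hmge : lo ≤ mid := hb.1
      have hfe : PySem.Int.floordiv (mid * (mid - 1)) 2 = (mid * (mid - 1)) / 2 :=
        PySem.Int.floordiv_eq_ediv_of_pos (by norm_num)
      have hev := mid_even mid
      rw [bsearchB]
      rw [dif_pos h]
      simp only [← hmid]
      by_cases hc : mid * n - PySem.Int.floordiv (mid * (mid - 1)) 2 ≥ k
      · rw [if_pos hc]
        have hc2 : 2 * (mid * n) - mid * (mid - 1) ≥ 2 * k := by
          rw [hfe] at hc; omega
        exact ihD (mid - lo).toNat (by omega) lo mid rfl hlo1 hmge (by omega) hc2 hloinv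
      · rw [if_neg hc]
        have hc2 : 2 * (mid * n) - mid * (mid - 1) < 2 * k := by
          rw [hfe] at hc; omega
        refine ihD (hi - (mid + 1)).toNat (by omega) (mid + 1) hi rfl (by omega) (by omega) hhin hhi ?_
        have h1 : mid + 1 - 1 = mid := by ring
        have h2 : mid + 1 - 2 = mid - 1 := by ring
        rw [h1, h2]
        exact hc2
    · rw [bsearchB, dif_neg h]
      have : lo = hi := by omega
      subst this
      exact ⟨hlo1, hhin, hhi, hloinv⟩

theorem tri_even (n : Int) : n * (n + 1) % 2 = 0 :=
  Int.even_iff.mp (Int.even_mul_succ_self n)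

-- ===== VERDICT (by name: the statement is the Claim_ definition above) =====
theorem sol_spec : Claim_equal_sol := by
  unfold Claim_equal_sol
  intro n k _
  unfold Spec_sol sol sol_alt
  dsimp only
  have hfe : PySem.Int.floordiv (n * (n + 1)) 2 = (n * (n + 1)) / 2 :=
    PySem.Int.floordiv_eq_ediv_of_pos (by norm_num)
  have hev := tri_even n
  rw [hfe]
  by_cases hn : n <= 0
  · conv_rhs => rw [if_pos (Or.inl hn)]
    rw [PySem.List.pyRange_neg_one_eq_nil (by omega)]
    simp only [solLoopA]
    by_cases hk : k = 0 <;> simp [hk]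
  · push Not at hn
    by_cases hk0 : k <= 0
    · conv_rhs => rw [if_pos (Or.inr (Or.inl hk0))]
      by_cases hk : k = 0
      · subst hk
        rw [solLoopA_zero]
        simp
      · have hkneg : k < 0 := by omega
        have hall : ∀ g ∈ PySem.List.pyRange n 0 (-1), (1:Int) ≤ g := by
          intro g hg
          have := (PySem.List.mem_pyRange_neg_one.mp hg).1
          omega
        rw [solLoopA_neg _ _ _ _ hkneg hall]
        simp [hk]
    · push Not at hk0
      have hncast : ((n.toNat : Nat) : Int) = n := Int.toNat_of_nonneg (by omega)
      by_cases hbig : k > n * (n + 1) / 2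
      · -- k exceeds the total: greedy drains every glass but water stays positive
        conv_rhs => rw [if_pos (Or.inr (Or.inr hbig))]
        have hb2 : n * (n + 1) < 2 * k := by omega
        obtain ⟨f, c, w', heq, hw'⟩ := loopA_over n.toNat k 0 0 (by omega)
          (by rw [hncast]; exact hb2)
        rw [hncast] at heq hw'
        rw [heq]
        have : w' ≠ 0 := by omega
        simp [this]
      · -- main case: 1 <= k <= n(n+1)/2 — both return the unique Good count
        conv_rhs => rw [if_neg (by rintro (h | h | h) <;> omega)]
        have hb2 : 2 * k <= n * (n + 1) := by omega
        obtain ⟨m, hgood, heq⟩ := loopA_main n.toNat k 0 0 (by omega)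
          (by rw [hncast]; exact hb2)
        rw [hncast] at heq hgood
        rw [heq]
        have hbs : Good n k (bsearchB n k 1 n) := by
          refine bsearchB_good n k (n - 1).toNat 1 n (by omega) (le_refl 1) (by omega)
            (le_refl n) (by nlinarith) (by norm_num; omega)
        have hum := Good_unique hgood hbs
        simp
        omega
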